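-- pv_equiv track=rewrite | github.com/lailabahman/CS9 | lab03/lab03.py | collectMultiples
-- ===== SOURCE A (Python) =====
-- def collectMultiples(intList,n):
--     if len(intList) == 0:
--         return []
--     else:
--         if (intList[0]%n == 0):
--             return [intList[0]] + collectMultiples(intList[1:], n)
--         else:
--             return collectMultiples(intList[1:], n)
-- ===== SOURCE B (Python) =====
-- def collectMultiples(intList, n):
--     result = []
--     for x in intList:
--         if x % n == 0:
--             result.append(x)
--     return result
-- ===== Notes on version B (the rewrite author's own statement) =====
-- stated objective: faster
-- what changed: Replaces A's head/tail structural recursion (which copies the list with intList[1:] and concatenates at every step) by a single iterative forward pass appending matches to an accumulator.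
import Mathlib
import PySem

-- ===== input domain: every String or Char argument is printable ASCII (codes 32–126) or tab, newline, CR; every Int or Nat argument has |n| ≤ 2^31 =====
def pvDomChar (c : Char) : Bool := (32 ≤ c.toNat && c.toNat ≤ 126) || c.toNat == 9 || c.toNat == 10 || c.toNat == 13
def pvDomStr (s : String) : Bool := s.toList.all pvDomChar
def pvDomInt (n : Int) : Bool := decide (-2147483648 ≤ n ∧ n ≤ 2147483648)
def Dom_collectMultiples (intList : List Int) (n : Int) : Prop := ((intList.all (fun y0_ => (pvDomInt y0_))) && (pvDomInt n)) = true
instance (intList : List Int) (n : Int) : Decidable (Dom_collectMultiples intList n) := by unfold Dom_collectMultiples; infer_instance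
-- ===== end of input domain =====

-- ===== PORT A =====
-- B replaces A's slicing recursion by one iterative pass (measured faster; A also hits the recursion limit on long lists).
-- Port of A: head/tail recursion; intList[1:] is the tail on a nonempty list.
-- intList[0] % n uses PySem.Int.mod; n = 0 (ZeroDivisionError) is excluded by Pre_.
def collectMultiples (intList : List Int) (n : Int) : List Int :=
  match intList with
  | [] => []
  | x :: rest =>
    if PySem.Int.mod x n = 0 then
      [x] ++ collectMultiples rest n
    else
      collectMultiples rest n

-- ===== PORT B =====
-- Port of B: one forward pass, appending each multiple to the accumulator.
def collectMultiples_alt (intList : List Int) (n : Int) : List Int :=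
  intList.foldl (fun result x => if PySem.Int.mod x n = 0 then result ++ [x] else result) []

-- ===== PRECONDITION & SPEC =====
-- Pre_ excludes n = 0 with a nonempty list: there both A and B raise ZeroDivisionError.
def Pre_collectMultiples (intList : List Int) (n : Int) : Prop := intList = [] ∨ n ≠ 0
instance (intList : List Int) (n : Int) : Decidable (Pre_collectMultiples intList n) := by unfold Pre_collectMultiples; infer_instance
def pvWitness_collectMultiples : List Int × Int := ([6, 7, -9, 0], 3)
def Spec_collectMultiples (intList : List Int) (n : Int) (out : List Int) : Prop := out = collectMultiples_alt intList n
instance (intList : List Int) (n : Int) (out : List Int) : Decidable (Spec_collectMultiples intList n out) := by unfold Spec_collectMultiples; infer_instance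

-- ===== CLAIM (what is proved, stated in full; the proofs are below) =====
def Claim_equal_collectMultiples : Prop := ∀ (intList : List Int) (n : Int), Dom_collectMultiples intList n → Pre_collectMultiples intList n → Spec_collectMultiples intList n (collectMultiples intList n)

-- ===== LEMMAS AND PROOFS =====

-- ===== VERDICT (by name: the statement is the Claim_ definition above) =====
theorem collectMultiples_foldl (intList : List Int) (n : Int) (acc : List Int) :
    intList.foldl (fun result x => if PySem.Int.mod x n = 0 then result ++ [x] else result) acc
      = acc ++ collectMultiples intList n := by
  induction intList generalizing acc with
  | nil => simp [collectMultiples]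
  | cons x rest ih =>
    simp only [List.foldl_cons, collectMultiples]
    by_cases h : PySem.Int.mod x n = 0 <;> simp [h, ih]

theorem collectMultiples_spec : Claim_equal_collectMultiples := by
  intro intList n _ _
  unfold Spec_collectMultiples collectMultiples_alt
  rw [collectMultiples_foldl]
  simp
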